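-- pv_equiv track=rewrite | github.com/Hyuoo/ReZeroPS | Programmers/L0/p120956.py | solution
-- ===== SOURCE A (Python) =====
-- def solution(babbling):
--     st = ["aya","ye","woo","ma"]
--     answer=0
--     for ba in babbling:
--         for s in st:
--             ba=ba.replace(s,"1")
--         ba=ba.replace("1","")
--         if(len(ba)==0):
--             answer+=1
--     return answer
-- ===== SOURCE B (Python) =====
-- def solution(babbling):
--     syllables = ("aya", "ye", "woo", "ma")
--
--     def valid(ba):
--         i = 0
--         while i < len(ba):
--             for s in syllables:
--                 if ba.startswith(s, i):
--                     i += len(s)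
--                     break
--             else:
--                 return False
--         return True
--
--     return sum(1 for ba in babbling if valid(ba))
-- ===== Notes on version B (the rewrite author's own statement) =====
-- stated objective: alternative
-- what changed: Replaces A's repeated global str.replace-with-sentinel-'1' passes by a single left-to-right prefix-consuming parse over the four syllables (the syllable set starts with four distinct letters, so greedy parsing is exact).
-- intended difference: On lists containing a word that is a concatenation of the syllables and the character '1' with at least one '1' (e.g. ['1'] or ['woo1ma']), A counts the word as valid because '1' is its internal replacement sentinel, while B counts only genuine syllable concatenations; B's count is the intended one since '1' is not babbling. — e.g. on solution(["1"]): A returns 1, B returns 0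
import Mathlib
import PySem

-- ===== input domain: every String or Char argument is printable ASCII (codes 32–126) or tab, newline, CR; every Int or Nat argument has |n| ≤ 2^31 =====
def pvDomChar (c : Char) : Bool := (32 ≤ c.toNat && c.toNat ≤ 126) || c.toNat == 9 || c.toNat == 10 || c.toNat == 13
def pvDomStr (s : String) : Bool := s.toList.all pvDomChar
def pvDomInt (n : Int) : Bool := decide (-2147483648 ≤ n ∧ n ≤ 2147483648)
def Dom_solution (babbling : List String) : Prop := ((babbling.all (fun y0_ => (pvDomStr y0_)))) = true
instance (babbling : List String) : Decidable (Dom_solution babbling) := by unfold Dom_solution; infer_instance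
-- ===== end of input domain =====

-- B replaces A's global replace-with-sentinel-'1' passes by one left-to-right prefix-consuming
-- parse over the four syllables (objective: alternative); on words built from syllables plus
-- A's sentinel character '1', B intentionally differs (see D_solution below).

-- ===== PORT A =====
def solution (babbling : List String) : Int :=
  babbling.foldl
    (fun answer ba =>
      -- for s in st: ba = ba.replace(s, "1")
      let ba := ["aya", "ye", "woo", "ma"].foldl (fun b s => PySem.Str.replace b s "1") ba
      -- ba = ba.replace("1", "")
      let ba := PySem.Str.replace ba "1" ""
      if PySem.Str.len ba == 0 then answer + 1 else answer)
    0

-- ===== PORT B =====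
-- cursor loop of Source B's `valid`, written on the remaining suffix: at each position try the
-- four syllables as a prefix in order; on a match advance past it, otherwise invalid.
def validFrom : List Char → Bool
  | [] => true
  | 'a' :: 'y' :: 'a' :: t => validFrom t
  | 'y' :: 'e' :: t => validFrom t
  | 'w' :: 'o' :: 'o' :: t => validFrom t
  | 'm' :: 'a' :: t => validFrom t
  | _ => false

def solution_alt (babbling : List String) : Int :=
  babbling.foldl (fun acc ba => if validFrom ba.toList then acc + 1 else acc) 0

-- ===== PRECONDITION & SPEC =====
-- helper for D_: the word is a concatenation of "aya","ye","woo","ma" and the one-char string "1"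
def onesTiled : List Char → Bool
  | [] => true
  | [c] => c = '1'
  | c :: d :: t =>
    if c = '1' then onesTiled (d :: t)
    else if c = 'a' then
      (match t with
       | [] => false
       | e :: u => if d = 'y' ∧ e = 'a' then onesTiled u else false)
    else if c = 'y' then (if d = 'e' then onesTiled t else false)
    else if c = 'w' then
      (match t with
       | [] => false
       | e :: u => if d = 'o' ∧ e = 'o' then onesTiled u else false)
    else if c = 'm' then (if d = 'a' then onesTiled t else false)
    else false

-- On words made of the four syllables plus at least one '1' (A's internal replacement
-- sentinel), A counts the word as valid babbling while B does not; B's count is the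
-- intended one, since '1' is not a pronounceable syllable.
def D_solution (babbling : List String) : Prop :=
  ∃ ba ∈ babbling, ba.toList.contains '1' = true ∧ onesTiled ba.toList = true
instance (babbling : List String) : Decidable (D_solution babbling) := by
  unfold D_solution; infer_instance

def Spec_solution (babbling : List String) (out : Int) : Prop :=
  ¬ D_solution babbling → out = solution_alt babbling
instance (babbling : List String) (out : Int) : Decidable (Spec_solution babbling out) := by
  unfold Spec_solution; infer_instance

def pvDiffWitness_solution : List String := (["1"])
def pvDiffWitnessOut_solution : Int × Int := (1, 0)

-- ===== CLAIM (what is proved, stated in full; the proofs are below) =====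
def Claim_unchanged_solution : Prop := ∀ (babbling : List String), Dom_solution babbling → Spec_solution babbling (solution babbling)
def Claim_changed_solution : Prop := Dom_solution (pvDiffWitness_solution) ∧ D_solution (pvDiffWitness_solution) ∧ solution (pvDiffWitness_solution) = pvDiffWitnessOut_solution.1 ∧ solution_alt (pvDiffWitness_solution) = pvDiffWitnessOut_solution.2 ∧ pvDiffWitnessOut_solution.1 ≠ pvDiffWitnessOut_solution.2
def Claim_exact_solution : Prop := ∀ (babbling : List String), Dom_solution babbling → D_solution babbling → solution babbling ≠ solution_alt babbling

-- ===== LEMMAS AND PROOFS =====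

-- ---- generic stepping equations for PySem.Chars.replace (nonempty pattern) ----
theorem go_nil (old new : List Char) (fuel : Nat) (acc : List Char) :
    PySem.Chars.replace.go old new fuel [] acc = acc.reverse := by
  cases fuel <;> simp [PySem.Chars.replace.go]

theorem go_acc (old new : List Char) : ∀ (fuel : Nat) (l acc : List Char),
    PySem.Chars.replace.go old new fuel l acc = acc.reverse ++ PySem.Chars.replace.go old new fuel l [] := by
  intro fuel
  induction fuel with
  | zero => intro l acc; simp [PySem.Chars.replace.go]
  | succ f ih =>
    intro l acc
    cases l with
    | nil => simp [go_nil]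
    | cons c t =>
      simp only [PySem.Chars.replace.go]
      by_cases h : old.isPrefixOf (c :: t) = true
      · simp only [h, if_true]
        rw [ih _ (new.reverse ++ acc), ih _ (new.reverse ++ [])]
        simp
      · simp only [h, if_false, Bool.false_eq_true]
        rw [ih _ (c :: acc), ih _ (c :: [])]
        simp

theorem go_fuel (old new : List Char) (hold : old ≠ []) : ∀ (fuel₁ fuel₂ : Nat) (l : List Char),
    l.length ≤ fuel₁ → l.length ≤ fuel₂ →
    PySem.Chars.replace.go old new fuel₁ l [] = PySem.Chars.replace.go old new fuel₂ l [] := by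
  intro fuel₁
  induction fuel₁ with
  | zero =>
    intro fuel₂ l hl _
    have : l = [] := List.length_eq_zero_iff.mp (Nat.le_zero.mp hl)
    subst this; simp [go_nil]
  | succ f ih =>
    intro fuel₂ l hl hl₂
    cases l with
    | nil => simp [go_nil]
    | cons c t =>
      cases fuel₂ with
      | zero => simp at hl₂
      | succ f₂ =>
        simp only [PySem.Chars.replace.go]
        by_cases h : old.isPrefixOf (c :: t) = true
        · simp only [h, if_true]
          have h1 : 1 ≤ old.length := by
            cases old with
            | nil => exact absurd rfl hold
            | cons _ _ => simp
          rw [go_acc, go_acc old new f₂]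
          rw [ih f₂ _ (by simp [List.length_drop] at *; omega) (by simp [List.length_drop] at *; omega)]
        · simp only [h, if_false, Bool.false_eq_true]
          rw [go_acc, go_acc old new f₂]
          rw [ih f₂ t (by simp at hl; omega) (by simp at hl₂; omega)]

theorem replace_nil (old new : List Char) (hold : old ≠ []) :
    PySem.Chars.replace [] old new = [] := by
  simp [PySem.Chars.replace, List.isEmpty_iff, hold, go_nil]

theorem replace_pos (old new l : List Char) (hold : old ≠ []) (h : old.isPrefixOf l = true) :
    PySem.Chars.replace l old new = new ++ PySem.Chars.replace (List.drop old.length l) old new := by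
  cases l with
  | nil =>
    have : old = [] := by simpa using List.IsPrefix.length_le (List.isPrefixOf_iff_prefix.mp h)
    exact absurd this hold
  | cons c t =>
    simp only [PySem.Chars.replace, List.isEmpty_iff, hold, if_false]
    simp only [List.length_cons, PySem.Chars.replace.go, h, if_true]
    rw [go_acc]
    have h1 : 1 ≤ old.length := by
      cases old with
      | nil => exact absurd rfl hold
      | cons _ _ => simp
    have hd : (List.drop old.length (c :: t)).length ≤ t.length := by
      simp only [List.length_drop, List.length_cons]; omega
    rw [go_fuel old new hold t.length (List.drop old.length (c :: t)).length _ hd (Nat.le_refl _)]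
    simp

theorem replace_neg (old new : List Char) (c : Char) (t : List Char) (hold : old ≠ [])
    (h : old.isPrefixOf (c :: t) = false) :
    PySem.Chars.replace (c :: t) old new = c :: PySem.Chars.replace t old new := by
  simp only [PySem.Chars.replace, List.isEmpty_iff, hold, if_false]
  simp only [List.length_cons, PySem.Chars.replace.go, h, if_false, Bool.false_eq_true]
  rw [go_acc]
  rfl

-- ---- the five stages of A's per-word pipeline, in list-of-chars form ----
def repAya (x : List Char) : List Char := PySem.Chars.replace x ['a','y','a'] ['1']
def repYe (x : List Char) : List Char := PySem.Chars.replace x ['y','e'] ['1']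
def repWoo (x : List Char) : List Char := PySem.Chars.replace x ['w','o','o'] ['1']
def repMa (x : List Char) : List Char := PySem.Chars.replace x ['m','a'] ['1']
def repOne (x : List Char) : List Char := PySem.Chars.replace x ['1'] []

def pipe (l : List Char) : List Char := repOne (repMa (repWoo (repYe (repAya l))))

-- prefix-failure helpers
theorem beqf {a c : Char} (h : ¬ c = a) : (a == c) = false := by
  cases hh : a == c with
  | false => rfl
  | true => exact absurd (eq_of_beq hh).symm h

theorem pfx1 (p c : Char) (ps t : List Char) (h : (p == c) = false) :
    (p :: ps).isPrefixOf (c :: t) = false := by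
  simp [List.isPrefixOf, h]

theorem pfx2 (a b : Char) (rest x : List Char) (h : x.head? ≠ some b) :
    (a :: b :: rest).isPrefixOf (a :: x) = false := by
  cases x with
  | nil => simp [List.isPrefixOf]
  | cons d u =>
    have hd : ¬ d = b := by simpa using h
    simp [List.isPrefixOf, beqf hd]

theorem pfx3 (a b c' : Char) (rest x : List Char) (h : x.head? ≠ some c') :
    (a :: b :: c' :: rest).isPrefixOf (a :: b :: x) = false := by
  cases x with
  | nil => simp [List.isPrefixOf]
  | cons d u =>
    have hd : ¬ d = c' := by simpa using h
    simp [List.isPrefixOf, beqf hd]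

-- equations for onesTiled (proved once; the definition is if/match-shaped)
theorem onesTiled_one (t : List Char) : onesTiled ('1' :: t) = onesTiled t := by
  cases t with
  | nil => simp [onesTiled]
  | cons d u => rw [onesTiled.eq_def]; simp
theorem onesTiled_aya (v : List Char) : onesTiled ('a' :: 'y' :: 'a' :: v) = onesTiled v := by
  rw [onesTiled.eq_def]; simp
theorem onesTiled_ye (v : List Char) : onesTiled ('y' :: 'e' :: v) = onesTiled v := by
  rw [onesTiled.eq_def]; simp
theorem onesTiled_woo (v : List Char) : onesTiled ('w' :: 'o' :: 'o' :: v) = onesTiled v := by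
  rw [onesTiled.eq_def]; simp
theorem onesTiled_ma (v : List Char) : onesTiled ('m' :: 'a' :: v) = onesTiled v := by
  rw [onesTiled.eq_def]; simp
theorem onesTiled_a_neg (t : List Char) (h : ['y','a'].isPrefixOf t = false) :
    onesTiled ('a' :: t) = false := by
  cases t with
  | nil => rw [onesTiled.eq_def]; simp
  | cons d u =>
    cases u with
    | nil => rw [onesTiled.eq_def]; simp
    | cons e w =>
      rw [onesTiled.eq_def]
      simp only [List.isPrefixOf, Bool.and_eq_false_iff, beq_eq_false_iff_ne, ne_eq] at h
      simp only [Char.reduceEq, if_true, if_false]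
      split
      · rename_i hyp
        rcases h with h | h
        · exact absurd hyp.1.symm h
        · rcases h with h | h
          · exact absurd hyp.2.symm h
          · simp at h
      · rfl
theorem onesTiled_y_neg (t : List Char) (h : t.head? ≠ some 'e') :
    onesTiled ('y' :: t) = false := by
  cases t with
  | nil => rw [onesTiled.eq_def]; simp
  | cons d u =>
    have hd : ¬ d = 'e' := by simpa using h
    rw [onesTiled.eq_def]; simp [hd]
theorem onesTiled_w_neg (t : List Char) (h : ['o','o'].isPrefixOf t = false) :
    onesTiled ('w' :: t) = false := by
  cases t with
  | nil => rw [onesTiled.eq_def]; simp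
  | cons d u =>
    cases u with
    | nil => rw [onesTiled.eq_def]; simp
    | cons e w =>
      rw [onesTiled.eq_def]
      simp only [List.isPrefixOf, Bool.and_eq_false_iff, beq_eq_false_iff_ne, ne_eq] at h
      simp only [Char.reduceEq, if_true, if_false]
      split
      · rename_i hyp
        rcases h with h | h
        · exact absurd hyp.1.symm h
        · rcases h with h | h
          · exact absurd hyp.2.symm h
          · simp at h
      · rfl
theorem onesTiled_m_neg (t : List Char) (h : t.head? ≠ some 'a') :
    onesTiled ('m' :: t) = false := by
  cases t with
  | nil => rw [onesTiled.eq_def]; simp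
  | cons d u =>
    have hd : ¬ d = 'a' := by simpa using h
    rw [onesTiled.eq_def]; simp [hd]
theorem onesTiled_default (c : Char) (t : List Char) (h1 : ¬ c = '1') (h2 : ¬ c = 'a')
    (h3 : ¬ c = 'y') (h4 : ¬ c = 'w') (h5 : ¬ c = 'm') : onesTiled (c :: t) = false := by
  cases t with
  | nil => rw [onesTiled.eq_def]; simp [h1]
  | cons d u => rw [onesTiled.eq_def]; simp [h1, h2, h3, h4, h5]
theorem oo_false_of_head (t : List Char) (h : t.head? ≠ some 'o') :
    ['o','o'].isPrefixOf t = false := by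
  cases t with
  | nil => simp [List.isPrefixOf]
  | cons d u =>
    have hd : ¬ d = 'o' := by simpa using h
    simp [List.isPrefixOf, beqf hd]
theorem oo_false_of_second (u : List Char) (h : u.head? ≠ some 'o') :
    ['o','o'].isPrefixOf ('o' :: u) = false := by
  cases u with
  | nil => simp [List.isPrefixOf]
  | cons d v =>
    have hd : ¬ d = 'o' := by simpa using h
    simp [List.isPrefixOf, beqf hd]

-- single-character pass-through equations
theorem repAya_cons (c : Char) (t : List Char) (h : ('a' == c) = false) :
    repAya (c :: t) = c :: repAya t :=
  replace_neg _ _ _ _ (by simp) (pfx1 _ _ _ _ h)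
theorem repYe_cons (c : Char) (t : List Char) (h : ('y' == c) = false) :
    repYe (c :: t) = c :: repYe t :=
  replace_neg _ _ _ _ (by simp) (pfx1 _ _ _ _ h)
theorem repWoo_cons (c : Char) (t : List Char) (h : ('w' == c) = false) :
    repWoo (c :: t) = c :: repWoo t :=
  replace_neg _ _ _ _ (by simp) (pfx1 _ _ _ _ h)
theorem repMa_cons (c : Char) (t : List Char) (h : ('m' == c) = false) :
    repMa (c :: t) = c :: repMa t :=
  replace_neg _ _ _ _ (by simp) (pfx1 _ _ _ _ h)
theorem repOne_cons (c : Char) (t : List Char) (h : ('1' == c) = false) :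
    repOne (c :: t) = c :: repOne t :=
  replace_neg _ _ _ _ (by simp) (pfx1 _ _ _ _ h)

-- blocked-match pass-through equations (failure past the first character)
theorem repYe_block (x : List Char) (h : x.head? ≠ some 'e') :
    repYe ('y' :: x) = 'y' :: repYe x :=
  replace_neg _ _ _ _ (by simp) (pfx2 _ _ _ _ h)
theorem repWoo_block1 (x : List Char) (h : x.head? ≠ some 'o') :
    repWoo ('w' :: x) = 'w' :: repWoo x :=
  replace_neg _ _ _ _ (by simp) (pfx2 _ _ _ _ h)
theorem repWoo_block2 (x : List Char) (h : x.head? ≠ some 'o') :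
    repWoo ('w' :: 'o' :: x) = 'w' :: repWoo ('o' :: x) :=
  replace_neg _ _ _ _ (by simp) (pfx3 _ _ _ _ _ h)
theorem repMa_block (x : List Char) (h : x.head? ≠ some 'a') :
    repMa ('m' :: x) = 'm' :: repMa x :=
  replace_neg _ _ _ _ (by simp) (pfx2 _ _ _ _ h)

-- match equations
theorem repAya_pos (v : List Char) : repAya ('a' :: 'y' :: 'a' :: v) = '1' :: repAya v := by
  rw [repAya, replace_pos _ _ _ (by simp) (by simp [List.isPrefixOf])]; rfl
theorem repYe_pos (v : List Char) : repYe ('y' :: 'e' :: v) = '1' :: repYe v := by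
  rw [repYe, replace_pos _ _ _ (by simp) (by simp [List.isPrefixOf])]; rfl
theorem repWoo_pos (v : List Char) : repWoo ('w' :: 'o' :: 'o' :: v) = '1' :: repWoo v := by
  rw [repWoo, replace_pos _ _ _ (by simp) (by simp [List.isPrefixOf])]; rfl
theorem repMa_pos (v : List Char) : repMa ('m' :: 'a' :: v) = '1' :: repMa v := by
  rw [repMa, replace_pos _ _ _ (by simp) (by simp [List.isPrefixOf])]; rfl
theorem repOne_pos (v : List Char) : repOne ('1' :: v) = repOne v := by
  rw [repOne, replace_pos _ _ _ (by simp) (by simp [List.isPrefixOf])]; rfl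

-- a sentinel '1' injected at stage k passes through the remaining stages and is erased
theorem tc5 (x : List Char) : repOne ('1' :: x) = repOne x := repOne_pos x
theorem tc4 (x : List Char) : repOne (repMa ('1' :: x)) = repOne (repMa x) := by
  rw [repMa_cons _ _ (by decide), tc5]
theorem tc3 (x : List Char) : repOne (repMa (repWoo ('1' :: x))) = repOne (repMa (repWoo x)) := by
  rw [repWoo_cons _ _ (by decide), tc4]
theorem tc2 (x : List Char) : repOne (repMa (repWoo (repYe ('1' :: x)))) = repOne (repMa (repWoo (repYe x))) := by
  rw [repYe_cons _ _ (by decide), tc3]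

-- head of a replace-by-"1" output: either the sentinel or the original head
theorem head_replace (pat l : List Char) (hold : pat ≠ []) :
    (PySem.Chars.replace l pat ['1']).head? = some '1' ∨
    (PySem.Chars.replace l pat ['1']).head? = l.head? := by
  cases l with
  | nil => right; rw [replace_nil _ _ hold]
  | cons c t =>
    by_cases h : pat.isPrefixOf (c :: t) = true
    · left; rw [replace_pos _ _ _ hold h]; rfl
    · right; rw [replace_neg _ _ _ _ hold (by simp only [Bool.not_eq_true] at h; exact h)]; rfl

theorem head_chain1 (t : List Char) :
    (repAya t).head? = some '1' ∨ (repAya t).head? = t.head? :=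
  head_replace _ _ (by simp)

theorem head_chain2 (t : List Char) :
    (repYe (repAya t)).head? = some '1' ∨ (repYe (repAya t)).head? = t.head? := by
  rcases head_replace ['y','e'] (repAya t) (by simp) with h | h
  · exact Or.inl h
  · rcases head_chain1 t with h' | h' <;> rw [repYe, h, h']
    · exact Or.inl rfl
    · exact Or.inr rfl

theorem head_chain3 (t : List Char) :
    (repWoo (repYe (repAya t))).head? = some '1' ∨
    (repWoo (repYe (repAya t))).head? = t.head? := by
  rcases head_replace ['w','o','o'] (repYe (repAya t)) (by simp) with h | h
  · exact Or.inl h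
  · rcases head_chain2 t with h' | h' <;> rw [repWoo, h, h']
    · exact Or.inl rfl
    · exact Or.inr rfl

-- ---- the main characterisation of A's pipeline ----
theorem pipe_empty : ∀ (n : Nat) (l : List Char), l.length ≤ n →
    ((pipe l = []) ↔ onesTiled l = true) := by
  intro n
  induction n with
  | zero =>
    intro l hl
    have : l = [] := List.length_eq_zero_iff.mp (Nat.le_zero.mp hl)
    subst this
    simp [pipe, repAya, repYe, repWoo, repMa, repOne, replace_nil, onesTiled]
  | succ n ih =>
    intro l hl
    cases l with
    | nil => simp [pipe, repAya, repYe, repWoo, repMa, repOne, replace_nil, onesTiled]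
    | cons c t =>
      by_cases hc1 : c = '1'
      · subst hc1
        have hp : pipe ('1' :: t) = pipe t := by
          rw [pipe, repAya_cons _ _ (by decide), tc2]; rfl
        rw [hp, ih t (by simp at hl; omega), onesTiled_one]
      by_cases hca : c = 'a'
      · subst hca
        by_cases hp3 : ['y','a'].isPrefixOf t = true
        · obtain ⟨v, rfl⟩ := List.isPrefixOf_iff_prefix.mp hp3
          simp only [List.cons_append, List.nil_append] at hl ⊢
          have hp : pipe ('a' :: 'y' :: 'a' :: v) = pipe v := by
            rw [pipe, repAya_pos, tc2]; rfl
          rw [hp, ih v (by simp at hl; omega), onesTiled_aya]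
        · have hp3' : ['y','a'].isPrefixOf t = false := by
            simp only [Bool.not_eq_true] at hp3; exact hp3
          have hne : ['a','y','a'].isPrefixOf ('a' :: t) = false := by
            simp [List.isPrefixOf, hp3']
          have hp : pipe ('a' :: t) = 'a' :: repOne (repMa (repWoo (repYe (repAya t)))) := by
            rw [pipe, repAya, replace_neg _ _ _ _ (by simp) hne, ← repAya,
              repYe_cons _ _ (by decide), repWoo_cons _ _ (by decide),
              repMa_cons _ _ (by decide), repOne_cons _ _ (by decide)]
          have hot : onesTiled ('a' :: t) = false := onesTiled_a_neg t hp3'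
          rw [hp, hot]; simp
      by_cases hcy : c = 'y'
      · subst hcy
        by_cases hye : t.head? = some 'e'
        · obtain ⟨u, rfl⟩ : ∃ u, t = 'e' :: u := by
            cases t with
            | nil => simp at hye
            | cons d u => exact ⟨u, by simpa using congrArg (fun o => o.getD 'x' :: u) hye⟩
          have hp : pipe ('y' :: 'e' :: u) = pipe u := by
            rw [pipe, repAya_cons _ _ (by decide), repAya_cons _ _ (by decide), repYe_pos, tc3]; rfl
          rw [hp, ih u (by simp at hl; omega), onesTiled_ye]
        · have hp : pipe ('y' :: t) = 'y' :: repOne (repMa (repWoo (repYe (repAya t)))) := by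
            have hh : (repAya t).head? ≠ some 'e' := by
              rcases head_chain1 t with h | h <;> rw [h]
              · decide
              · exact hye
            rw [pipe, repAya_cons _ _ (by decide), repYe_block _ hh,
              repWoo_cons _ _ (by decide), repMa_cons _ _ (by decide),
              repOne_cons _ _ (by decide)]
          have hot : onesTiled ('y' :: t) = false := onesTiled_y_neg t hye
          rw [hp, hot]; simp
      by_cases hcw : c = 'w'
      · subst hcw
        by_cases hw1 : t.head? = some 'o'
        · obtain ⟨u, rfl⟩ : ∃ u, t = 'o' :: u := by
            cases t with
            | nil => simp at hw1
            | cons d u => exact ⟨u, by simpa using congrArg (fun o => o.getD 'x' :: u) hw1⟩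
          by_cases hw2 : u.head? = some 'o'
          · obtain ⟨v, rfl⟩ : ∃ v, u = 'o' :: v := by
              cases u with
              | nil => simp at hw2
              | cons d v => exact ⟨v, by simpa using congrArg (fun o => o.getD 'x' :: v) hw2⟩
            have hp : pipe ('w' :: 'o' :: 'o' :: v) = pipe v := by
              rw [pipe, repAya_cons _ _ (by decide), repAya_cons _ _ (by decide),
                repAya_cons _ _ (by decide), repYe_cons _ _ (by decide),
                repYe_cons _ _ (by decide), repYe_cons _ _ (by decide), repWoo_pos, tc4]; rfl
            rw [hp, ih v (by simp at hl; omega), onesTiled_woo]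
          · have hp : pipe ('w' :: 'o' :: u) =
                'w' :: repOne (repMa (repWoo ('o' :: repYe (repAya u)))) := by
              have hh : (repYe (repAya u)).head? ≠ some 'o' := by
                rcases head_chain2 u with h | h <;> rw [h]
                · decide
                · exact hw2
              rw [pipe, repAya_cons _ _ (by decide), repAya_cons _ _ (by decide),
                repYe_cons _ _ (by decide), repYe_cons _ _ (by decide),
                repWoo_block2 _ hh, repMa_cons _ _ (by decide), repOne_cons _ _ (by decide)]
            have hot : onesTiled ('w' :: 'o' :: u) = false :=
              onesTiled_w_neg ('o' :: u) (oo_false_of_second u hw2)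
            rw [hp, hot]; simp
        · have hp : pipe ('w' :: t) = 'w' :: repOne (repMa (repWoo (repYe (repAya t)))) := by
            have hh : (repYe (repAya t)).head? ≠ some 'o' := by
              rcases head_chain2 t with h | h <;> rw [h]
              · decide
              · exact hw1
            rw [pipe, repAya_cons _ _ (by decide), repYe_cons _ _ (by decide),
              repWoo_block1 _ hh, repMa_cons _ _ (by decide), repOne_cons _ _ (by decide)]
          have hot : onesTiled ('w' :: t) = false :=
            onesTiled_w_neg t (oo_false_of_head t hw1)
          rw [hp, hot]; simp
      by_cases hcm : c = 'm'
      · subst hcm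
        by_cases hm1 : t.head? = some 'a'
        · obtain ⟨u, rfl⟩ : ∃ u, t = 'a' :: u := by
            cases t with
            | nil => simp at hm1
            | cons d u => exact ⟨u, by simpa using congrArg (fun o => o.getD 'x' :: u) hm1⟩
          by_cases hA : ['y','a'].isPrefixOf u = true
          · obtain ⟨v, rfl⟩ := List.isPrefixOf_iff_prefix.mp hA
            simp only [List.cons_append, List.nil_append] at hl ⊢
            have hp : pipe ('m' :: 'a' :: 'y' :: 'a' :: v) =
                'm' :: repOne ('1' :: repMa (repWoo (repYe (repAya v)))) := by
              rw [pipe, repAya_cons _ _ (by decide), repAya_pos,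
                repYe_cons _ _ (by decide), repYe_cons _ _ (by decide),
                repWoo_cons _ _ (by decide), repWoo_cons _ _ (by decide),
                repMa_block _ (by simp), repMa_cons _ _ (by decide),
                repOne_cons _ _ (by decide)]
            have hot : onesTiled ('m' :: 'a' :: 'y' :: 'a' :: v) = false := by
              rw [onesTiled_ma, onesTiled_y_neg ('a' :: v) (by simp)]
            rw [hp, hot]; simp
          · have hA' : ['y','a'].isPrefixOf u = false := by
              simp only [Bool.not_eq_true] at hA; exact hA
            have hpre : ['a','y','a'].isPrefixOf ('a' :: u) = false := by
              simp [List.isPrefixOf, hA']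
            have hp : pipe ('m' :: 'a' :: u) = pipe u := by
              rw [pipe, repAya_cons _ _ (by decide), repAya,
                replace_neg _ _ _ _ (by simp) hpre, ← repAya,
                repYe_cons _ _ (by decide), repYe_cons _ _ (by decide),
                repWoo_cons _ _ (by decide), repWoo_cons _ _ (by decide),
                repMa_pos, tc5]; rfl
            rw [hp, ih u (by simp at hl; omega), onesTiled_ma]
        · have hp : pipe ('m' :: t) = 'm' :: repOne (repMa (repWoo (repYe (repAya t)))) := by
            have hh : (repWoo (repYe (repAya t))).head? ≠ some 'a' := by
              rcases head_chain3 t with h | h <;> rw [h]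
              · decide
              · exact hm1
            rw [pipe, repAya_cons _ _ (by decide), repYe_cons _ _ (by decide),
              repWoo_cons _ _ (by decide), repMa_block _ hh, repOne_cons _ _ (by decide)]
          have hot : onesTiled ('m' :: t) = false := onesTiled_m_neg t hm1
          rw [hp, hot]; simp
      · -- c matches no syllable start and is not the sentinel
        have hp : pipe (c :: t) = c :: repOne (repMa (repWoo (repYe (repAya t)))) := by
          rw [pipe, repAya_cons _ _ (beqf hca), repYe_cons _ _ (beqf hcy),
            repWoo_cons _ _ (beqf hcw), repMa_cons _ _ (beqf hcm),
            repOne_cons _ _ (beqf hc1)]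
        have hot : onesTiled (c :: t) = false :=
          onesTiled_default c t hc1 hca hcy hcw hcm
        rw [hp, hot]; simp

-- ---- B's parser versus the tiling predicate ----
theorem validFrom_eq : ∀ (n : Nat) (l : List Char), l.length ≤ n →
    validFrom l = (onesTiled l && !(l.contains '1')) := by
  intro n
  induction n with
  | zero =>
    intro l hl
    have : l = [] := List.length_eq_zero_iff.mp (Nat.le_zero.mp hl)
    subst this; simp [validFrom, onesTiled]
  | succ n ih =>
    intro l hl
    cases l with
    | nil => simp [validFrom, onesTiled]
    | cons c t =>
      by_cases hc1 : c = '1'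
      · subst hc1
        have hv : validFrom ('1' :: t) = false := by
          rw [validFrom.eq_def]; split <;> simp_all
        simp [hv]
      by_cases hca : c = 'a'
      · subst hca
        by_cases hp3 : ['y','a'].isPrefixOf t = true
        · obtain ⟨v, rfl⟩ := List.isPrefixOf_iff_prefix.mp hp3
          simp only [List.cons_append, List.nil_append] at hl ⊢
          rw [show validFrom ('a' :: 'y' :: 'a' :: v) = validFrom v from by simp [validFrom],
            onesTiled_aya, ih v (by simp at hl; omega)]
          simp
        · have hv : validFrom ('a' :: t) = false := by
            rw [validFrom.eq_def]; split <;> simp_all [List.isPrefixOf]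
          have hp3' : ['y','a'].isPrefixOf t = false := by
            simp only [Bool.not_eq_true] at hp3; exact hp3
          have hot : onesTiled ('a' :: t) = false := onesTiled_a_neg t hp3'
          simp [hv, hot]
      by_cases hcy : c = 'y'
      · subst hcy
        by_cases hye : t.head? = some 'e'
        · obtain ⟨u, rfl⟩ : ∃ u, t = 'e' :: u := by
            cases t with
            | nil => simp at hye
            | cons d u => exact ⟨u, by simpa using congrArg (fun o => o.getD 'x' :: u) hye⟩
          rw [show validFrom ('y' :: 'e' :: u) = validFrom u from by simp [validFrom],
            onesTiled_ye, ih u (by simp at hl; omega)]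
          simp
        · have hv : validFrom ('y' :: t) = false := by
            rw [validFrom.eq_def]; split <;> simp_all
          have hot : onesTiled ('y' :: t) = false := onesTiled_y_neg t hye
          simp [hv, hot]
      by_cases hcw : c = 'w'
      · subst hcw
        by_cases hwo : ['o','o'].isPrefixOf t = true
        · obtain ⟨v, rfl⟩ := List.isPrefixOf_iff_prefix.mp hwo
          simp only [List.cons_append, List.nil_append] at hl ⊢
          rw [show validFrom ('w' :: 'o' :: 'o' :: v) = validFrom v from by simp [validFrom],
            onesTiled_woo, ih v (by simp at hl; omega)]
          simp
        · have hv : validFrom ('w' :: t) = false := by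
            rw [validFrom.eq_def]; split <;> simp_all [List.isPrefixOf]
          have hwo' : ['o','o'].isPrefixOf t = false := by
            simp only [Bool.not_eq_true] at hwo; exact hwo
          have hot : onesTiled ('w' :: t) = false := onesTiled_w_neg t hwo'
          simp [hv, hot]
      by_cases hcm : c = 'm'
      · subst hcm
        by_cases hma : t.head? = some 'a'
        · obtain ⟨u, rfl⟩ : ∃ u, t = 'a' :: u := by
            cases t with
            | nil => simp at hma
            | cons d u => exact ⟨u, by simpa using congrArg (fun o => o.getD 'x' :: u) hma⟩
          rw [show validFrom ('m' :: 'a' :: u) = validFrom u from by simp [validFrom],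
            onesTiled_ma, ih u (by simp at hl; omega)]
          simp
        · have hv : validFrom ('m' :: t) = false := by
            rw [validFrom.eq_def]; split <;> simp_all
          have hot : onesTiled ('m' :: t) = false := onesTiled_m_neg t hma
          simp [hv, hot]
      · have hv : validFrom (c :: t) = false := by
          rw [validFrom.eq_def]; split <;> simp_all
        have hot : onesTiled (c :: t) = false :=
          onesTiled_default c t hc1 hca hcy hcw hcm
        simp [hv, hot]

-- ---- bridging the String-level ports to the characterisations ----
def condA (ba : String) : Bool :=
  PySem.Str.len
    (PySem.Str.replace
      (["aya", "ye", "woo", "ma"].foldl (fun b s => PySem.Str.replace b s "1") ba)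
      "1" "") == 0

def condB (ba : String) : Bool := validFrom ba.toList

theorem condA_eq (ba : String) : condA ba = onesTiled ba.toList := by
  have hlist :
      (PySem.Str.replace
        (["aya", "ye", "woo", "ma"].foldl (fun b s => PySem.Str.replace b s "1") ba)
        "1" "").toList = pipe ba.toList := by
    simp only [List.foldl, PySem.Str.toList_replace]
    rfl
  have hpe := pipe_empty ba.toList.length ba.toList (Nat.le_refl _)
  rw [condA, PySem.Str.len_eq, hlist]
  cases hot : onesTiled ba.toList with
  | true =>
    have : pipe ba.toList = [] := hpe.mpr hot
    simp [this]
  | false =>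
    have hne : ¬ pipe ba.toList = [] := fun h => by simp [hpe.mp h] at hot
    have hlen : (pipe ba.toList).length ≠ 0 := fun h => hne (List.length_eq_zero_iff.mp h)
    simp [Int.natCast_eq_zero, hlen]

theorem condB_eq (ba : String) : condB ba = (onesTiled ba.toList && !(ba.toList.contains '1')) :=
  validFrom_eq ba.toList.length ba.toList (Nat.le_refl _)

-- ---- counting ----
theorem foldl_count (p : String → Bool) : ∀ (l : List String) (acc : Int),
    List.foldl (fun a x => if p x then a + 1 else a) acc l = acc + ((l.countP p : Nat) : Int) := by
  intro l
  induction l with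
  | nil => intro acc; simp
  | cons x xs ih =>
    intro acc
    by_cases hx : p x = true <;> simp [List.countP_cons, hx, ih] <;> push_cast <;> ring

theorem solution_eq_countP (babbling : List String) :
    solution babbling = ((babbling.countP condA : Nat) : Int) := by
  have : solution babbling =
      List.foldl (fun a x => if condA x then a + 1 else a) 0 babbling := rfl
  rw [this, foldl_count]
  simp

theorem solution_alt_eq_countP (babbling : List String) :
    solution_alt babbling = ((babbling.countP condB : Nat) : Int) := by
  have : solution_alt babbling =
      List.foldl (fun a x => if condB x then a + 1 else a) 0 babbling := rfl
  rw [this, foldl_count]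
  simp

theorem countP_congr' {α : Type} (p q : α → Bool) :
    ∀ (l : List α), (∀ a ∈ l, p a = q a) → l.countP p = l.countP q := by
  intro l
  induction l with
  | nil => intro _; rfl
  | cons x xs ih =>
    intro h
    simp only [List.countP_cons, h x (by simp), ih (fun a ha => h a (by simp [ha]))]

theorem countP_lt {α : Type} (p q : α → Bool) :
    ∀ (l : List α), (∀ a ∈ l, q a = true → p a = true) →
      (∃ a ∈ l, p a = true ∧ q a = false) → l.countP q < l.countP p := by
  intro l
  induction l with
  | nil => rintro _ ⟨a, ha, _⟩; simp at ha
  | cons x xs ih =>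
    rintro hmono ⟨a, ha, hpa, hqa⟩
    have hle : xs.countP q ≤ xs.countP p :=
      List.countP_mono_left (fun b hb hqb => hmono b (by simp [hb]) hqb)
    rcases List.mem_cons.mp ha with rfl | hmem
    · simp [List.countP_cons, hpa, hqa]
      omega
    · have hlt : xs.countP q < xs.countP p := ih
        (fun b hb hqb => hmono b (by simp [hb]) hqb) ⟨a, hmem, hpa, hqa⟩
      simp only [List.countP_cons]
      by_cases hx : q x = true
      · have hpx : p x = true := hmono x (by simp) hx
        simp [hx, hpx]; omega
      · have hqx : q x = false := by simp only [Bool.not_eq_true] at hx; exact hx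
        simp only [List.countP_cons, hqx, Bool.false_eq_true, if_false]
        split <;> omega

-- per-word agreement outside D_
theorem cond_agree (ba : String) (h : ¬ (ba.toList.contains '1' = true ∧ onesTiled ba.toList = true)) :
    condA ba = condB ba := by
  rw [condA_eq, condB_eq]
  cases hc : ba.toList.contains '1' with
  | false => simp
  | true =>
    have : onesTiled ba.toList = false := by
      cases hot : onesTiled ba.toList with
      | false => rfl
      | true => exact absurd ⟨hc, hot⟩ h
    simp [this]

-- ===== VERDICT (by name: the statement is the Claim_ definition above) =====
theorem solution_spec : Claim_unchanged_solution := by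
  intro babbling _
  unfold Spec_solution
  intro hD
  rw [solution_eq_countP, solution_alt_eq_countP]
  have : babbling.countP condA = babbling.countP condB := by
    apply countP_congr'
    intro ba hba
    exact cond_agree ba (fun hcontra => hD ⟨ba, hba, hcontra⟩)
  rw [this]

theorem solution_changed : Claim_changed_solution := by
  unfold Claim_changed_solution; decide

theorem solution_tight : Claim_exact_solution := by
  intro babbling _ hD
  obtain ⟨ba, hmem, hcont, htiled⟩ := hD
  rw [solution_eq_countP, solution_alt_eq_countP]
  have hlt : babbling.countP condB < babbling.countP condA := by
    apply countP_lt
    · intro b _ hq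
      rw [condB_eq] at hq
      rw [condA_eq]
      exact (Bool.and_eq_true_iff.mp hq).1
    · refine ⟨ba, hmem, ?_, ?_⟩
      · rw [condA_eq]; exact htiled
      · rw [condB_eq, hcont]; simp
  intro h
  have := Int.ofNat_inj.mp h
  omega
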